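-- pv_equiv track=rewrite | github.com/vijaykeswani/Fair-Classification-with-Partial-Feedback | algorithms.py | update_data_include
-- ===== SOURCE A (Python) =====
-- def update_data_include(pred, data_cur, data_u, data_l):
--     for i in range(len(pred)):
--         if pred[i] == 1:
--             data_l[0].append(data_cur[0][i]) # add X
--             data_l[1].append(data_cur[1][i]) # add (true) y
--         else:
--             data_u[0].append(data_cur[0][i]) # add X
--             data_u[1].append(0) # add y
--             # no y to be added
--     return (data_l), (data_u)
-- ===== SOURCE B (Python) =====
-- def update_data_include(pred, data_cur, data_u, data_l):
--     sel = [i for i in range(len(pred)) if pred[i] == 1]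
--     uns = [i for i in range(len(pred)) if pred[i] != 1]
--     data_l[0].extend(data_cur[0][i] for i in sel)
--     data_l[1].extend(data_cur[1][i] for i in sel)
--     data_u[0].extend(data_cur[0][i] for i in uns)
--     data_u[1].extend(0 for _ in uns)
--     return (data_l), (data_u)
-- ===== Notes on version B (the rewrite author's own statement) =====
-- stated objective: alternative
-- what changed: Replaces the single interleaved per-element loop with an index partition (selected/unselected index lists computed first) followed by four separate bulk extends, one per target list.
import Mathlib
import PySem

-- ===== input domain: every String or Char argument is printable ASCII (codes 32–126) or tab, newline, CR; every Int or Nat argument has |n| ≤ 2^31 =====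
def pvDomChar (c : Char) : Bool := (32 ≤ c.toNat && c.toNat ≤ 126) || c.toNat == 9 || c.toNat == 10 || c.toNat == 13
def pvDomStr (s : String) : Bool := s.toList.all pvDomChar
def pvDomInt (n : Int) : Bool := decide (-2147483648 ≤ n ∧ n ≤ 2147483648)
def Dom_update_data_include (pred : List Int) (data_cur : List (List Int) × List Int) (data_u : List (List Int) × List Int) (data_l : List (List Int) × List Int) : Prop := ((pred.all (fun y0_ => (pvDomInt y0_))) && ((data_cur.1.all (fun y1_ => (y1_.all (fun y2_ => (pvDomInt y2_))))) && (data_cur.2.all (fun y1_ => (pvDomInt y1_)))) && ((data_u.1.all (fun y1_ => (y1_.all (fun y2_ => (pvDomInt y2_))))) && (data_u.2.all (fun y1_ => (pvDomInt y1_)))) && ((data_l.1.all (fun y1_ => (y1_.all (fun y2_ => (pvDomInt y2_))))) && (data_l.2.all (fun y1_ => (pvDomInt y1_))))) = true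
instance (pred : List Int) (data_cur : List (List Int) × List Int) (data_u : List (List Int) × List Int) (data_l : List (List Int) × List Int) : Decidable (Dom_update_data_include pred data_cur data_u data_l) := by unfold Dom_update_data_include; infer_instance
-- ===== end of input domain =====

-- B replaces A's single interleaved per-index loop by an index partition (selected / unselected
-- index lists) followed by four separate bulk extends; objective: alternative decomposition,
-- same O(n) cost. Both Pythons mutate data_l/data_u in place identically; the equivalence
-- proved here is about the returned value.

-- ===== PORT A =====
-- the body of A's for-loop: one step of the interleaved pass (state = (data_l, data_u))
def pvStepA (pred : List Int) (data_cur : List (List Int) × List Int)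
    (st : (List (List Int) × List Int) × (List (List Int) × List Int)) (i : Int) :
    (List (List Int) × List Int) × (List (List Int) × List Int) :=
  if PySem.List.pyGetD pred i 0 = 1 then
    ((st.1.1 ++ [PySem.List.pyGetD data_cur.1 i []], st.1.2 ++ [PySem.List.pyGetD data_cur.2 i 0]), st.2)
  else
    (st.1, (st.2.1 ++ [PySem.List.pyGetD data_cur.1 i []], st.2.2 ++ [(0 : Int)]))

def update_data_include (pred : List Int) (data_cur : List (List Int) × List Int) (data_u : List (List Int) × List Int) (data_l : List (List Int) × List Int) : (List (List Int) × List Int) × (List (List Int) × List Int) :=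
  (PySem.List.pyRange 0 (pred.length : Int) 1).foldl (pvStepA pred data_cur) (data_l, data_u)

-- ===== PORT B =====
def update_data_include_alt (pred : List Int) (data_cur : List (List Int) × List Int) (data_u : List (List Int) × List Int) (data_l : List (List Int) × List Int) : (List (List Int) × List Int) × (List (List Int) × List Int) :=
  let sel := (List.range pred.length).filter (fun i => decide (pred.getD i 0 = 1))
  let uns := (List.range pred.length).filter (fun i => ! decide (pred.getD i 0 = 1))
  ((data_l.1 ++ sel.map (fun i => data_cur.1.getD i []),
    data_l.2 ++ sel.map (fun i => data_cur.2.getD i 0)),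
   (data_u.1 ++ uns.map (fun i => data_cur.1.getD i []),
    data_u.2 ++ uns.map (fun _ => (0 : Int))))

-- ===== PRECONDITION & SPEC =====
-- Pre_ excludes exactly the inputs where Python A raises IndexError: an index i < len(pred)
-- whose data_cur[0] row (or, on the pred[i]==1 branch, data_cur[1] entry) is missing.
def Pre_update_data_include (pred : List Int) (data_cur : List (List Int) × List Int) (data_u : List (List Int) × List Int) (data_l : List (List Int) × List Int) : Prop :=
  ∀ i ∈ List.range pred.length, i < data_cur.1.length ∧ (pred.getD i 0 = 1 → i < data_cur.2.length)
instance (pred : List Int) (data_cur : List (List Int) × List Int) (data_u : List (List Int) × List Int) (data_l : List (List Int) × List Int) : Decidable (Pre_update_data_include pred data_cur data_u data_l) := by unfold Pre_update_data_include; infer_instance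

def pvWitness_update_data_include : List Int × (List (List Int) × List Int) × (List (List Int) × List Int) × (List (List Int) × List Int) :=
  ([1, 0, 1], ([[1, 2], [3], [4]], [5, 6, 7]), ([[9]], [0]), ([[8]], [1]))

def Spec_update_data_include (pred : List Int) (data_cur : List (List Int) × List Int) (data_u : List (List Int) × List Int) (data_l : List (List Int) × List Int) (out : (List (List Int) × List Int) × (List (List Int) × List Int)) : Prop := out = update_data_include_alt pred data_cur data_u data_l
instance (pred : List Int) (data_cur : List (List Int) × List Int) (data_u : List (List Int) × List Int) (data_l : List (List Int) × List Int) (out : (List (List Int) × List Int) × (List (List Int) × List Int)) : Decidable (Spec_update_data_include pred data_cur data_u data_l out) := by unfold Spec_update_data_include; infer_instance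

-- ===== CLAIM (what is proved, stated in full; the proofs are below) =====
def Claim_equal_update_data_include : Prop := ∀ (pred : List Int) (data_cur : List (List Int) × List Int) (data_u : List (List Int) × List Int) (data_l : List (List Int) × List Int), Dom_update_data_include pred data_cur data_u data_l → Pre_update_data_include pred data_cur data_u data_l → Spec_update_data_include pred data_cur data_u data_l (update_data_include pred data_cur data_u data_l)

-- ===== LEMMAS AND PROOFS =====

-- the interleaved fold over range(n) equals the four-list partition form, for every n
lemma pvLoop_eq (pred : List Int) (data_cur : List (List Int) × List Int) :
    ∀ (n : Nat) (dl du : List (List Int) × List Int),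
      (PySem.List.pyRange 0 (n : Int) 1).foldl (pvStepA pred data_cur) (dl, du) =
      ((dl.1 ++ ((List.range n).filter (fun i => decide (pred.getD i 0 = 1))).map (fun i => data_cur.1.getD i []),
        dl.2 ++ ((List.range n).filter (fun i => decide (pred.getD i 0 = 1))).map (fun i => data_cur.2.getD i 0)),
       (du.1 ++ ((List.range n).filter (fun i => ! decide (pred.getD i 0 = 1))).map (fun i => data_cur.1.getD i []),
        du.2 ++ ((List.range n).filter (fun i => ! decide (pred.getD i 0 = 1))).map (fun _ => (0 : Int)))) := by
  intro n
  induction n with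
  | zero => intro dl du; simp [PySem.List.pyRange_one_eq_nil]
  | succ n ih =>
    intro dl du
    have hsplit : PySem.List.pyRange 0 ((n + 1 : Nat) : Int) 1
        = PySem.List.pyRange 0 (n : Int) 1 ++ [(n : Int)] := by
      push_cast
      exact PySem.List.pyRange_one_succ_right (by positivity)
    rw [hsplit, List.foldl_append, ih]
    simp only [List.foldl_cons, List.foldl_nil, pvStepA, PySem.List.pyGetD_natCast]
    by_cases h : pred[n]?.getD 0 = 1 <;>
      simp [h, List.getD, List.range_succ, List.filter_append, List.map_append, List.append_assoc]

theorem update_data_include_spec : Claim_equal_update_data_include := by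
  intro pred data_cur data_u data_l _ _
  unfold Spec_update_data_include update_data_include update_data_include_alt
  exact pvLoop_eq pred data_cur pred.length data_l data_u
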